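-- pv_equiv track=rewrite | github.com/acybppres/Lothar | Collatz/kenglish/mrlattice.py | mrTupFromPath
-- ===== SOURCE A (Python) =====
-- N_i = ((0,0), [])
--
-- def F_0(mr_tup):
--     return ( (mr_tup[0][0]+1, mr_tup[0][1]-1), mr_tup[1] + [(mr_tup[0][0], mr_tup[0][1]-1)] )
--
-- def F_1(mr_tup):
--     return ((mr_tup[0][0]+1, mr_tup[0][1]), mr_tup[1])
--
-- def mrTupFromPath(label):
--     """ Create an mrTup given a path (label)
--     """
--     mr_tup = N_i
--     for bit in label:
--         if bit == "1":
--             mr_tup = F_1(mr_tup)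
--         else:
--             mr_tup = F_0(mr_tup)
--     return mr_tup
-- ===== SOURCE B (Python) =====
-- def mrTupFromPath(label):
--     """ Create an mrTup given a path (label) """
--     zeros = [i for i, c in enumerate(label) if c != "1"]
--     lst = [(pos, -(k + 1)) for k, pos in enumerate(zeros)]
--     return ((len(label), -len(zeros)), lst)
-- ===== Notes on version B (the rewrite author's own statement) =====
-- stated objective: faster
-- what changed: Replaces the stepwise state-threading loop over F_0/F_1 (which rebuilds the list via '+' on every zero bit) with one pass gathering the zero-bit positions plus a closed-form mapping: each entry's r-coordinate comes from its enumeration index and the final coordinates from len(label) and the zero count.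
import Mathlib
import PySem

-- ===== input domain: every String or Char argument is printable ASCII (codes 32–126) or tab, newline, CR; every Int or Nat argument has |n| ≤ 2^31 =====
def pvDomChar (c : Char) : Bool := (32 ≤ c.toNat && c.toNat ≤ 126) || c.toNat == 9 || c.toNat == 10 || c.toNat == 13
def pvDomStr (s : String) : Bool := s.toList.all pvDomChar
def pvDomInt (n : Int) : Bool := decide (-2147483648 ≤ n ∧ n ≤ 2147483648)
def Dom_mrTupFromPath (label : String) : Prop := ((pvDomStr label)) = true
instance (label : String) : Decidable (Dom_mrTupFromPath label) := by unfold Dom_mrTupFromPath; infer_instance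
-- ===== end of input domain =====

-- B replaces A's stepwise F_0/F_1 state-threading loop with a pass gathering
-- non-'1' positions plus a closed-form index-to-tuple mapping, avoiding per-bit list concatenation (objective: faster, measured).

-- ===== PORT A =====
def mrN_i : (Int × Int) × (List (Int × Int)) := ((0, 0), [])

def mrF0 (t : (Int × Int) × (List (Int × Int))) : (Int × Int) × (List (Int × Int)) :=
  ((t.1.1 + 1, t.1.2 - 1), t.2 ++ [(t.1.1, t.1.2 - 1)])

def mrF1 (t : (Int × Int) × (List (Int × Int))) : (Int × Int) × (List (Int × Int)) :=
  ((t.1.1 + 1, t.1.2), t.2)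

def mrTupFromPath (label : String) : (Int × Int) × (List (Int × Int)) :=
  label.toList.foldl (fun mr_tup bit => if bit = '1' then mrF1 mr_tup else mrF0 mr_tup) mrN_i

-- ===== PORT B =====
def mrTupFromPath_alt (label : String) : (Int × Int) × (List (Int × Int)) :=
  let zeros : List Int :=
    ((PySem.List.enumerate label.toList 0).filter (fun p => p.2 ≠ '1')).map (·.1)
  let lst : List (Int × Int) :=
    (PySem.List.enumerate zeros 0).map (fun p => (p.2, -(p.1 + 1)))
  (((label.toList.length : Int), -(zeros.length : Int)), lst)

-- ===== PRECONDITION & SPEC =====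
def Spec_mrTupFromPath (label : String) (out : (Int × Int) × (List (Int × Int))) : Prop := out = mrTupFromPath_alt label
instance (label : String) (out : (Int × Int) × (List (Int × Int))) : Decidable (Spec_mrTupFromPath label out) := by unfold Spec_mrTupFromPath; infer_instance

-- ===== CLAIM (what is proved, stated in full; the proofs are below) =====
def Claim_equal_mrTupFromPath : Prop := ∀ (label : String), Dom_mrTupFromPath label → Spec_mrTupFromPath label (mrTupFromPath label)

-- ===== LEMMAS AND PROOFS =====

/-- Positions (as Ints, starting at `m`) of the non-'1' characters of `cs`. -/
def mrZ (cs : List Char) (m : Int) : List Int :=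
  ((PySem.List.enumerate cs m).filter (fun p => p.2 ≠ '1')).map (·.1)

theorem mrZ_nil (m : Int) : mrZ [] m = [] := rfl

theorem mrZ_cons (c : Char) (cs : List Char) (m : Int) :
    mrZ (c :: cs) m = if c = '1' then mrZ cs (m + 1) else m :: mrZ cs (m + 1) := by
  simp only [mrZ, PySem.List.enumerate_cons, List.filter_cons]
  by_cases h : c = '1' <;> simp [h]

theorem mr_key (cs : List Char) (m r t : Int) (l : List (Int × Int)) :
    cs.foldl (fun mr_tup bit => if bit = '1' then mrF1 mr_tup else mrF0 mr_tup) ((m, r), l) =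
      ((m + (cs.length : Int), r - ((mrZ cs m).length : Int)),
        l ++ (PySem.List.enumerate (mrZ cs m) t).map (fun p => (p.2, r + t - (p.1 + 1)))) := by
  induction cs generalizing m r t l with
  | nil => simp [mrZ_nil]
  | cons c cs ih =>
    rw [List.foldl_cons, mrZ_cons]
    by_cases h : c = '1'
    · rw [if_pos h, if_pos h,
        show mrF1 ((m, r), l) = ((m + 1, r), l) from rfl, ih (m + 1) r t l]
      refine Prod.ext (Prod.ext ?_ rfl) rfl
      push_cast [List.length_cons]; ring
    · rw [if_neg h, if_neg h,
        show mrF0 ((m, r), l) = ((m + 1, r - 1), l ++ [(m, r - 1)]) from rfl,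
        ih (m + 1) (r - 1) (t + 1) (l ++ [(m, r - 1)])]
      refine Prod.ext (Prod.ext ?_ ?_) ?_
      · push_cast [List.length_cons]; ring
      · push_cast [List.length_cons]; ring
      · have h1 : r + t - (t + 1) = r - 1 := by ring
        have h2 : ∀ x : Int, r - 1 + (t + 1) - (x + 1) = r + t - (x + 1) := fun x => by ring
        simp only [PySem.List.enumerate_cons, List.map_cons, List.append_assoc,
          List.cons_append, List.nil_append, h1, h2]

-- ===== VERDICT (by name: the statement is the Claim_ definition above) =====
theorem mrTupFromPath_spec : Claim_equal_mrTupFromPath := by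
  intro label _
  show mrTupFromPath label = mrTupFromPath_alt label
  unfold mrTupFromPath mrTupFromPath_alt mrN_i
  rw [mr_key label.toList 0 0 0 []]
  simp [mrZ]
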